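-- pv_equiv track=rewrite | github.com/cestpasphoto/alpha-zero-general | akropolis/AkropolisPlayers.py | _compute_scoring_positions
-- ===== SOURCE A (Python) =====
-- def _compute_scoring_positions(all_universes):
--     result = {}
--     for i, universe in all_universes.items():
--         scoring_positions_by_level = []
--         for level in range(len(universe)-1):
--             # Lister toutes les coordonnées de level qui ne sont pas listées dans level+1
--             hex_in_cur_level   = set([c for t in universe[level] for c in t])
--             hex_in_upper_level = set([c for t in universe[level+1] for c in t])
--             scoring_positions = hex_in_cur_level - hex_in_upper_level
--             scoring_positions_by_level.append(scoring_positions)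
--         # For last level, all positions are scoring positions
--         scoring_positions_by_level.append({c for t in universe[-1] for c in t})
--         result[i] = scoring_positions_by_level
--     return result
-- ===== SOURCE B (Python) =====
-- def _compute_scoring_positions(all_universes):
--     result = {}
--     for i, universe in all_universes.items():
--         # inverted index: each hex coordinate -> the levels on which it occurs
--         occ = {}
--         for l, level in enumerate(universe):
--             for t in level:
--                 for c in t:
--                     occ.setdefault(c, []).append(l)
--         last = len(universe) - 1
--         by_level = []
--         for l, level in enumerate(universe):
--             seen = set()
--             sp = []
--             for t in level:
--                 for c in t:
--                     if c not in seen: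
--                         seen.add(c)
--                         if l == last or (l + 1) not in occ[c]:
--                             sp.append(c)
--             by_level.append(set(sp))
--         result[i] = by_level
--     return result
-- ===== Notes on version B (the rewrite author's own statement) =====
-- stated objective: alternative
-- what changed: A computes, for each level, two freshly built hex sets and subtracts them; B instead builds one inverted index mapping each coordinate to the list of levels it occurs on, then emits per level the first occurrences whose index lacks level+1 - no set subtraction at all.
-- crash fix: On any input containing a universe with no levels, A raises IndexError at the final universe[-1] subscript; B maps that key to a zero-length per-level result. — e.g. on _compute_scoring_positions([(0, [])]): A raises IndexError, B returns [(0, [])]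
import Mathlib
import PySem

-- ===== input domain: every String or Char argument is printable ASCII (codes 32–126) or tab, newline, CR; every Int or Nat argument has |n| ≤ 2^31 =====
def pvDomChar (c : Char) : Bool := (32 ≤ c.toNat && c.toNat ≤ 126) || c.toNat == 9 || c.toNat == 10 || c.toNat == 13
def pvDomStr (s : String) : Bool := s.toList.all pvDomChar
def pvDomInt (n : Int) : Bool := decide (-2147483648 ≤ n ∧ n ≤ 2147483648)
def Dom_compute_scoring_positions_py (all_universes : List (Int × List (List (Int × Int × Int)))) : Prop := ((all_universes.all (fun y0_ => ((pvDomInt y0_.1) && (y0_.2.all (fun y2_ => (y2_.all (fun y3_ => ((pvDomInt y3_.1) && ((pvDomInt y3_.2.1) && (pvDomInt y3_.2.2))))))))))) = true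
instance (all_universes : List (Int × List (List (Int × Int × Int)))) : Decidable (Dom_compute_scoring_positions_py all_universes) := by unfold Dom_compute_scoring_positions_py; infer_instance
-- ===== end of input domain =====

-- B replaces A's per-level set subtraction by an inverted index (coordinate -> levels it
-- occurs on) built once, then a per-level membership test; objective: alternative algorithm.

-- the three hexes of one tile: used by A's comprehension and B's inner 'for c in t' loop
def pvTriple (t : Int × Int × Int) : List Int := [t.1, t.2.1, t.2.2]

-- flatten one level's triples: [c for t in level for c in t]
def pvFlat (level : List (Int × Int × Int)) : List Int :=
  level.flatMap pvTriple

-- ===== PORT A =====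
-- inner loop of A for one univ (range(len-1) with forward indexing, then univ[-1])
def pvInnerA (univ : List (List (Int × Int × Int))) : List (List Int) :=
  ((PySem.List.pyRange 0 ((univ.length : Int) - 1) 1).foldl
    (fun acc lvl =>
      acc ++ [PySem.Set.diff
        (PySem.Set.ofList (pvFlat (PySem.List.pyGetD univ lvl [])))
        (PySem.Set.ofList (pvFlat (PySem.List.pyGetD univ (lvl + 1) [])))]) [])
  ++ [PySem.Set.ofList (pvFlat (PySem.List.pyGetD univ (-1) []))]

def compute_scoring_positions_py (all_universes : List (Int × List (List (Int × Int × Int)))) : List (Int × List (List Int)) :=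
  (all_universes.foldl
    (fun (result : PySem.Dict Int (List (List Int))) p => result.insert p.1 (pvInnerA p.2))
    PySem.Dict.empty).items

-- ===== PORT B =====
-- occ build: B's nested loops 'for l, level in enumerate(universe): for t in level:
-- for c in t: occ.setdefault(c, []).append(l)'
def pvOcc (univ : List (List (Int × Int × Int))) : PySem.Dict Int (List Int) :=
  (PySem.List.enumerate univ 0).foldl
    (fun occ le => le.2.foldl
      (fun occ t => (pvTriple t).foldl
        (fun (occ : PySem.Dict Int (List Int)) c => occ.modify c [] (· ++ [le.1])) occ) occ)
    PySem.Dict.empty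

-- one fold step of B's inner loop: 'if c not in seen: seen.add(c); if P(c): sp.append(c)'
def pvStepP (P : Int → Bool) (st : List Int × List Int) (c : Int) : List Int × List Int :=
  if PySem.Set.contains st.1 c then st
  else (PySem.Set.add st.1 c, if P c then st.2 ++ [c] else st.2)

-- B's scoring condition 'l == last or (l + 1) not in occ[c]'; every queried c is a key of
-- occ (it comes from the same universe), so getD is exact for occ[c]
def pvCondB (occ : PySem.Dict Int (List Int)) (last l : Int) (c : Int) : Bool :=
  l == last || !((occ.getD c []).contains (l + 1))

-- one level of B's second pass: build sp, then set(sp)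
def pvLevelB (occ : PySem.Dict Int (List Int)) (last l : Int)
    (level : List (Int × Int × Int)) : List Int :=
  PySem.Set.ofList
    ((level.foldl (fun st t => (pvTriple t).foldl (pvStepP (pvCondB occ last l)) st)
        (PySem.Set.empty, [])).2)

def pvInnerB (univ : List (List (Int × Int × Int))) : List (List Int) :=
  let occ := pvOcc univ
  let last : Int := (univ.length : Int) - 1
  (PySem.List.enumerate univ 0).foldl
    (fun acc le => acc ++ [pvLevelB occ last le.1 le.2]) []

def compute_scoring_positions_py_alt (all_universes : List (Int × List (List (Int × Int × Int)))) : List (Int × List (List Int)) :=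
  (all_universes.foldl
    (fun (result : PySem.Dict Int (List (List Int))) p => result.insert p.1 (pvInnerB p.2))
    PySem.Dict.empty).items

-- ===== PRECONDITION & SPEC =====
-- Pre_ excludes inputs containing a universe with no levels: there A raises
-- IndexError on the final subscript universe[-1].
def Pre_compute_scoring_positions_py (all_universes : List (Int × List (List (Int × Int × Int)))) : Prop :=
  ∀ p ∈ all_universes, p.2 ≠ []
instance (all_universes : List (Int × List (List (Int × Int × Int)))) : Decidable (Pre_compute_scoring_positions_py all_universes) := by unfold Pre_compute_scoring_positions_py; infer_instance

def pvWitness_compute_scoring_positions_py : (List (Int × List (List (Int × Int × Int)))) :=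
  [(0, [[(0, 0, 0), (0, 1, -1)], [(0, 0, 0)]]), (1, [[(1, 2, 3)]])]

def Spec_compute_scoring_positions_py (all_universes : List (Int × List (List (Int × Int × Int)))) (out : List (Int × List (List Int))) : Prop := out = compute_scoring_positions_py_alt all_universes
instance (all_universes : List (Int × List (List (Int × Int × Int)))) (out : List (Int × List (List Int))) : Decidable (Spec_compute_scoring_positions_py all_universes out) := by unfold Spec_compute_scoring_positions_py; infer_instance

-- On any input containing a universe with no levels, A raises IndexError at the final
-- universe[-1] subscript; B maps that key to a zero-length per-level result.
def Raises_compute_scoring_positions_py (all_universes : List (Int × List (List (Int × Int × Int)))) : Prop :=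
  ∃ p ∈ all_universes, p.2 = []
instance (all_universes : List (Int × List (List (Int × Int × Int)))) : Decidable (Raises_compute_scoring_positions_py all_universes) := by unfold Raises_compute_scoring_positions_py; infer_instance

def pvRaiseWitness_compute_scoring_positions_py : (List (Int × List (List (Int × Int × Int)))) := [(0, [])]
def pvRaiseWitnessOut_compute_scoring_positions_py : List (Int × List (List Int)) := [(0, [])]

-- ===== CLAIM (what is proved, stated in full; the proofs are below) =====
def Claim_equal_compute_scoring_positions_py : Prop := ∀ (all_universes : List (Int × List (List (Int × Int × Int)))), Dom_compute_scoring_positions_py all_universes → Pre_compute_scoring_positions_py all_universes → Spec_compute_scoring_positions_py all_universes (compute_scoring_positions_py all_universes)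

def Claim_raises_compute_scoring_positions_py : Prop := (∀ (all_universes : List (Int × List (List (Int × Int × Int)))), Dom_compute_scoring_positions_py all_universes → Raises_compute_scoring_positions_py all_universes → ¬ Pre_compute_scoring_positions_py all_universes) ∧ (Dom_compute_scoring_positions_py (pvRaiseWitness_compute_scoring_positions_py) ∧ Raises_compute_scoring_positions_py (pvRaiseWitness_compute_scoring_positions_py) ∧ compute_scoring_positions_py_alt (pvRaiseWitness_compute_scoring_positions_py) = pvRaiseWitnessOut_compute_scoring_positions_py)

-- ===== LEMMAS AND PROOFS =====

-- set of a level's hexes, indexed (Nat world)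
def pvSetAt (u : List (List (Int × Int × Int))) (i : Nat) : List Int :=
  PySem.Set.ofList (pvFlat (u.getD i []))

-- the (coordinate, level) pairs B's occ-building loops traverse, flattened
def pvPairs (univ : List (List (Int × Int × Int))) : List (Int × Int) :=
  (PySem.List.enumerate univ 0).flatMap (fun le => (pvFlat le.2).map (fun c => (c, le.1)))

-- nested tile/hex loops over a level = one fold over the flattened level
theorem pv_foldl_flat {β : Type} (f : β → Int → β) (level : List (Int × Int × Int)) (b : β) :
    level.foldl (fun b t => (pvTriple t).foldl f b) b = (pvFlat level).foldl f b := by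
  induction level generalizing b with
  | nil => rfl
  | cons t rest ih => simp [pvFlat, List.foldl_append, ih, List.flatMap_cons]

-- occ is the pair list folded through modify-append
theorem pv_fold_pairs (L : List (Int × List (Int × Int × Int))) (d : PySem.Dict Int (List Int)) :
    L.foldl (fun occ le => le.2.foldl
      (fun occ t => (pvTriple t).foldl
        (fun (occ : PySem.Dict Int (List Int)) c => occ.modify c [] (· ++ [le.1])) occ) occ) d
    = (L.flatMap (fun le => (pvFlat le.2).map (fun c => (c, le.1)))).foldl
        (fun (d : PySem.Dict Int (List Int)) p => d.modify p.1 [] (· ++ [p.2])) d := by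
  induction L generalizing d with
  | nil => rfl
  | cons le rest ih =>
    simp only [List.foldl_cons, List.flatMap_cons, List.foldl_append]
    rw [pv_foldl_flat, List.foldl_map, ih]

theorem pvOcc_eq (univ : List (List (Int × Int × Int))) :
    pvOcc univ = (pvPairs univ).foldl
      (fun (d : PySem.Dict Int (List Int)) p => d.modify p.1 [] (· ++ [p.2]))
      PySem.Dict.empty := by
  unfold pvOcc pvPairs
  exact pv_fold_pairs _ _

theorem pvOcc_getD (univ : List (List (Int × Int × Int))) (c : Int) :
    (pvOcc univ).getD c [] = ((pvPairs univ).filter (·.1 == c)).map (·.2) := by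
  rw [pvOcc_eq, PySem.Dict.getD_foldl_modify_append]
  rfl

-- membership in occ[c] = occurrence on that level
theorem pv_mem_occ (univ : List (List (Int × Int × Int))) (c : Int) (j : Nat) :
    ((j : Int) ∈ (pvOcc univ).getD c []) ↔ (j < univ.length ∧ c ∈ pvFlat (univ.getD j [])) := by
  rw [pvOcc_getD]
  constructor
  · rintro hm
    rw [List.mem_map] at hm
    obtain ⟨p, hp, hsnd⟩ := hm
    rw [List.mem_filter] at hp
    obtain ⟨hp, hfst⟩ := hp
    rw [pvPairs, List.mem_flatMap] at hp
    obtain ⟨le, hle, hpc⟩ := hp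
    rw [List.mem_map] at hpc
    obtain ⟨c', hc', hpe⟩ := hpc
    rw [PySem.List.mem_enumerate_iff] at hle
    obtain ⟨k, hk, hlee⟩ := hle
    subst hpe; subst hlee
    simp only [beq_iff_eq] at hfst
    simp only at hsnd hfst
    subst hfst
    have hjk : j = k := by omega
    subst hjk
    refine ⟨hk, ?_⟩
    rw [List.getD_eq_getElem _ _ hk]
    exact hc'
  · rintro ⟨hj, hc⟩
    rw [List.mem_map]
    refine ⟨(c, (j : Int)), ?_, rfl⟩
    rw [List.mem_filter]
    refine ⟨?_, by simp⟩
    rw [pvPairs, List.mem_flatMap]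
    refine ⟨((j : Int), univ[j]), ?_, ?_⟩
    · rw [PySem.List.mem_enumerate_iff]
      exact ⟨j, hj, by simp⟩
    · rw [List.mem_map]
      refine ⟨c, ?_, rfl⟩
      rwa [List.getD_eq_getElem _ _ hj] at hc

-- closed form of B's seen/sp fold
theorem pv_fold_stepP (P : Int → Bool) (xs : List Int) (seen out : List Int) :
    xs.foldl (pvStepP P) (seen, out)
      = (PySem.Set.update seen xs,
         out ++ ((PySem.Set.ofList xs).filter (fun y => !(PySem.Set.contains seen y))).filter P) := by
  induction xs using List.reverseRecOn with
  | nil => simp [PySem.Set.update, PySem.Set.ofList]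
  | append_singleton ys c ih =>
    rw [List.foldl_append, ih, PySem.Set.ofList_append_singleton]
    have hupd : PySem.Set.update seen (ys ++ [c]) = (PySem.Set.update seen ys).add c := by
      simp [PySem.Set.update, List.foldl_append]
    simp only [List.foldl_cons, List.foldl_nil, pvStepP]
    by_cases hc : c ∈ PySem.Set.update seen ys
    · rw [if_pos ((PySem.Set.contains_iff _ _).mpr hc)]
      rw [hupd, PySem.Set.add_of_mem hc]
      rcases (PySem.Set.mem_update seen ys c).mp hc with hseen | hys
      · by_cases hof : c ∈ PySem.Set.ofList ys
        · rw [PySem.Set.add_of_mem hof]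
        · rw [PySem.Set.add_of_not_mem hof, List.filter_append, List.filter_append]
          simp [hseen]
      · rw [PySem.Set.add_of_mem ((PySem.Set.mem_ofList ys c).mpr hys)]
    · rw [if_neg (by simpa [PySem.Set.contains_iff] using hc)]
      have hnseen : c ∉ seen := fun h => hc ((PySem.Set.mem_update seen ys c).mpr (Or.inl h))
      have hnys : c ∉ PySem.Set.ofList ys := fun h =>
        hc ((PySem.Set.mem_update seen ys c).mpr (Or.inr ((PySem.Set.mem_ofList ys c).mp h)))
      rw [PySem.Set.add_of_not_mem hnys, List.filter_append, List.filter_append]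
      have hcs : PySem.Set.contains seen c = false := by
        rcases h : PySem.Set.contains seen c with _ | _
        · rfl
        · exact absurd ((PySem.Set.contains_iff _ _).mp h) hnseen
      rw [hupd]
      by_cases hP : P c = true
      · simp [hP, hnseen]
      · simp [Bool.eq_false_iff.mpr hP]

theorem pvLevelB_eq_filter (occ : PySem.Dict Int (List Int)) (last l : Int)
    (level : List (Int × Int × Int)) :
    pvLevelB occ last l level
      = (PySem.Set.ofList (pvFlat level)).filter (pvCondB occ last l) := by
  unfold pvLevelB
  rw [pv_foldl_flat, pv_fold_stepP]
  have h1 : ((PySem.Set.ofList (pvFlat level)).filter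
      (fun y => !(PySem.Set.contains PySem.Set.empty y))) = PySem.Set.ofList (pvFlat level) := by
    apply List.filter_eq_self.mpr
    intro a _
    rfl
  rw [List.nil_append, h1]
  exact PySem.Set.ofList_eq_self_of_nodup _ ((PySem.Set.nodup_ofList _).filter _)

-- A's inner loop as an indexed map
theorem pvInnerA_eq_map (u : List (List (Int × Int × Int))) (hu : u ≠ []) :
    pvInnerA u
      = (List.range (u.length - 1)).map
          (fun i => PySem.Set.diff (pvSetAt u i) (pvSetAt u (i + 1)))
        ++ [PySem.Set.ofList (pvFlat (u.getLast hu))] := by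
  unfold pvInnerA
  rw [PySem.List.foldl_append_singleton_eq_map, PySem.List.pyRange_one, List.map_map,
      PySem.List.pyGetD_neg_one u [] hu]
  have hn : ((((u.length : Int) - 1) - 0)).toNat = u.length - 1 := by omega
  rw [hn, List.nil_append]
  congr 1
  apply List.map_congr_left
  intro i _
  simp only [Function.comp_apply]
  have e1 : (0 : Int) + (i : Nat) = ((i : Nat) : Int) := by omega
  have e2 : ((i : Nat) : Int) + 1 = (((i + 1 : Nat)) : Int) := by omega
  rw [e1, e2, PySem.List.pyGetD_natCast, PySem.List.pyGetD_natCast]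
  rfl

-- B's inner loop as the same indexed map
theorem pvInnerB_eq_map (u : List (List (Int × Int × Int))) (hu : u ≠ []) :
    pvInnerB u
      = (List.range (u.length - 1)).map
          (fun i => PySem.Set.diff (pvSetAt u i) (pvSetAt u (i + 1)))
        ++ [PySem.Set.ofList (pvFlat (u.getLast hu))] := by
  obtain ⟨n, hn⟩ : ∃ n, u.length = n + 1 := by
    cases u with
    | nil => exact absurd rfl hu
    | cons a t => exact ⟨t.length, rfl⟩
  have hdiff : ∀ s t : List Int, PySem.Set.diff s t = s.filter (fun x => !(t.contains x)) := by
    intro s t; simp [PySem.Set.diff]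
  unfold pvInnerB
  rw [PySem.List.foldl_append_singleton_eq_map, PySem.List.enumerate_eq_map_pyRange u [],
      List.map_map, PySem.List.pyRange_one, List.map_map, List.nil_append]
  have hcast : ((PySem.List.len u : Int) - 0).toNat = u.length := by
    simp [PySem.List.len]
  rw [hcast, hn, List.range_succ, List.map_append]
  congr 1
  · simp only [Nat.add_sub_cancel]
    apply List.map_congr_left
    intro k hk
    rw [List.mem_range] at hk
    simp only [Function.comp_apply]
    have e1 : (0 : Int) + (k : Nat) = ((k : Nat) : Int) := by omega
    rw [e1, PySem.List.pyGetD_natCast, pvLevelB_eq_filter, pvSetAt, hdiff]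
    apply List.filter_congr
    intro c _
    have hbeq : (((k : Nat) : Int) == (((n + 1 : Nat)) : Int) - 1) = false := by
      rw [beq_eq_false_iff_ne]
      omega
    have hmem : (((k : Nat) : Int) + 1 ∈ (pvOcc u).getD c []) ↔ c ∈ pvSetAt u (k + 1) := by
      rw [show (((k : Nat) : Int) + 1) = (((k + 1 : Nat)) : Int) by push_cast; ring,
          pv_mem_occ, pvSetAt, PySem.Set.mem_ofList]
      constructor
      · exact fun h => h.2
      · exact fun h => ⟨by omega, h⟩
    have hcont : ((pvOcc u).getD c []).contains (((k : Nat) : Int) + 1)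
        = (pvSetAt u (k + 1)).contains c := by
      rw [Bool.coe_iff_coe.symm, List.contains_iff_mem, List.contains_iff_mem]
      exact hmem
    simp only [pvCondB, hbeq, Bool.false_or, hcont]
  · simp only [Function.comp_apply, List.map_cons, List.map_nil]
    congr 1
    have e1 : (0 : Int) + ((n : Nat) : Int) = ((n : Nat) : Int) := by omega
    rw [e1, PySem.List.pyGetD_natCast, pvLevelB_eq_filter]
    have hget : u.getD n [] = u.getLast hu := by
      rw [List.getLast_eq_getElem, List.getD_eq_getElem _ _ (by omega)]
      congr 1
      omega
    rw [hget]
    apply List.filter_eq_self.mpr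
    intro c _
    simp only [pvCondB]
    have hbeq : (((n : Nat) : Int) == (((n + 1 : Nat)) : Int) - 1) = true := by
      rw [beq_iff_eq]
      omega
    rw [hbeq, Bool.true_or]

theorem pvInnerA_eq_pvInnerB (u : List (List (Int × Int × Int))) (hu : u ≠ []) :
    pvInnerA u = pvInnerB u := by
  rw [pvInnerA_eq_map u hu, pvInnerB_eq_map u hu]

theorem pv_fold_congr (l : List (Int × List (List (Int × Int × Int))))
    (hl : ∀ p ∈ l, p.2 ≠ []) (d : PySem.Dict Int (List (List Int))) :
    l.foldl (fun result p => result.insert p.1 (pvInnerA p.2)) d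
      = l.foldl (fun result p => result.insert p.1 (pvInnerB p.2)) d := by
  induction l generalizing d with
  | nil => rfl
  | cons p rest ih =>
    simp only [List.foldl_cons]
    rw [pvInnerA_eq_pvInnerB p.2 (hl p (by simp))]
    exact ih (fun q hq => hl q (by simp [hq])) _

-- ===== VERDICT (by name: the statement is the Claim_ definition above) =====
theorem compute_scoring_positions_py_spec : Claim_equal_compute_scoring_positions_py := by
  intro all_universes _ hpre
  unfold Spec_compute_scoring_positions_py compute_scoring_positions_py compute_scoring_positions_py_alt
  rw [pv_fold_congr all_universes hpre]

theorem compute_scoring_positions_py_raises : Claim_raises_compute_scoring_positions_py := by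
  unfold Claim_raises_compute_scoring_positions_py
  constructor
  · intro all_universes _ ⟨p, hp, hemp⟩ hpre
    exact hpre p hp hemp
  · exact ⟨by decide, ⟨(0, []), by decide, rfl⟩, by decide⟩

-- self-check: the raise witness really lies inside Raises_, extracted from the theorem above
theorem pvRaiseWitness_compute_scoring_positions_py_ok :
    Raises_compute_scoring_positions_py pvRaiseWitness_compute_scoring_positions_py :=
  compute_scoring_positions_py_raises.2.2.1
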